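-- pv_equiv track=rewrite | github.com/Flu-iid/parand_algo | answers/03A-S.py | check_max_score
-- ===== SOURCE A (Python) =====
-- def check_max_score(s: str, k: int):
--     string_map = dict()  # dictionary for charecters of string
--     for c in s:
--         key = (c.lower(), c.upper())
--         string_map.setdefault(key, [0, 0])
--         # each dict key consists of a tupple with lowercase and uppercare charecter
--         # like ("a", "A")
--         # so after we read each char of string, we can evaluate number of upper and lower cases
--         # each dict value consists of a list with score for lower and upper
--         # [0, 0]
--         if c == c.lower():
--             string_map[key][0] += 1
--         else:
--             string_map[key][1] += 1
--
--     base_score = 0  # score achieved from difference between upper and lower letter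
--     extra_score = 0  # score achieved after k operation
--
--     for key in string_map:
--         base_score += min(string_map[key])
--         # value is a list data type. so lists minimum, will be set as base score
--         # e.g. aaa and AAAAA, it has 3 base_score since it can have 3 a and A pairs
--         extra_score += int(abs(string_map[key][1] - string_map[key][0])/2)
--         # for values aaa, AAAAA after base score we are left with AA
--         # if we use 1 of k to lower on of A, we can get extra score(extra_score)
--         # so for each pair we can get extra score if we have k.
--     if extra_score >= k:
--         return (base_score + k)
--     else:
--         return (base_score + extra_score)
-- ===== SOURCE B (Python) =====
-- def check_max_score(s: str, k: int):
--     # distinct (lower, upper) keys in first-occurrence order, then two counting passes per key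
--     keys = list(dict.fromkeys((c.lower(), c.upper()) for c in s))
--     base = 0
--     pairs = 0
--     for key in keys:
--         lower = sum(1 for c in s if (c.lower(), c.upper()) == key and c == c.lower())
--         upper = sum(1 for c in s if (c.lower(), c.upper()) == key and c != c.lower())
--         base += min(lower, upper)
--         pairs += (lower + upper) // 2
--     extra = pairs - base
--     return base + (k if extra >= k else extra)
-- ===== Notes on version B (the rewrite author's own statement) =====
-- stated objective: alternative
-- what changed: Replaces the mutable dict of running [lower,upper] tallies with a dedup of the key sequence plus counting passes per distinct key, and replaces the per-key abs-difference//2 bookkeeping by total pairs (lower+upper)//2 minus base, returning base + min-like clamp of (pairs - base) against k.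
import Mathlib
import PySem

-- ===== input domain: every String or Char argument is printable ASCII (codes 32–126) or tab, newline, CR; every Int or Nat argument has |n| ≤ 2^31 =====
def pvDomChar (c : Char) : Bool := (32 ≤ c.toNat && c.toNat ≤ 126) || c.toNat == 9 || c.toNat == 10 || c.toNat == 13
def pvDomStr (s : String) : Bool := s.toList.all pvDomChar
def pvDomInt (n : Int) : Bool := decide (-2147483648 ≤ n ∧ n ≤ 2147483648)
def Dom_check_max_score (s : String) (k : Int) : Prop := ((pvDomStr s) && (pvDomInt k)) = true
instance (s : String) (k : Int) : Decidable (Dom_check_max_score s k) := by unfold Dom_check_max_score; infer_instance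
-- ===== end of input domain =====

-- B replaces A's dict of running [lower,upper] tallies by a dedup of the key sequence plus
-- counting passes per distinct key, and replaces the per-key |upper-lower|//2 bookkeeping by
-- total (lower+upper)//2 minus the base score (objective: alternative; same results, no speed claim).

-- ===== PORT A =====
-- c.lower() / c.upper() for a single char; exact on the ASCII domain (Dom_check_max_score)
def pvLower (c : Char) : Char := if 'A' ≤ c ∧ c ≤ 'Z' then Char.ofNat (c.toNat + 32) else c
def pvUpper (c : Char) : Char := if 'a' ≤ c ∧ c ≤ 'z' then Char.ofNat (c.toNat - 32) else c
-- key = (c.lower(), c.upper())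
def pvKey (c : Char) : Char × Char := (pvLower c, pvUpper c)

-- one iteration of A's first loop: setdefault to [0,0] then bump index 0 or 1
-- (the fixed two-element list [lower, upper] is modelled as the pair (lower, upper))
def pvStepA (d : PySem.Dict (Char × Char) (Int × Int)) (c : Char) : Int × Int :=
  let v := d.getD (pvKey c) (0, 0)
  if c = pvLower c then (v.1 + 1, v.2) else (v.1, v.2 + 1)

def check_max_score (s : String) (k : Int) : Int :=
  let m := s.toList.foldl (fun d c => d.insert (pvKey c) (pvStepA d c)) PySem.Dict.empty
  -- 'for key in string_map': iterate the dict's keys in insertion order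
  let p := m.keys.foldl (fun (p : Int × Int) key =>
      let v := m.getD key (0, 0)
      (p.1 + min v.1 v.2,                                  -- base_score += min(string_map[key])
       p.2 + PySem.Int.floordiv |v.2 - v.1| 2)) (0, 0)     -- extra_score += int(abs(...)/2)
  if p.2 ≥ k then p.1 + k else p.1 + p.2

-- ===== PORT B =====
-- sum(1 for c in s if (c.lower(), c.upper()) == key and c == c.lower())   (resp. c != c.lower())
def pvCntL (cs : List Char) (key : Char × Char) : Int :=
  (cs.countP (fun c => pvKey c == key && c == pvLower c) : Int)
def pvCntU (cs : List Char) (key : Char × Char) : Int :=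
  (cs.countP (fun c => pvKey c == key && c != pvLower c) : Int)

def check_max_score_alt (s : String) (k : Int) : Int :=
  let cs := s.toList
  let keys := PySem.List.dedup (cs.map pvKey)      -- list(dict.fromkeys(...))
  let p := keys.foldl (fun (p : Int × Int) key =>
      (p.1 + min (pvCntL cs key) (pvCntU cs key),
       p.2 + PySem.Int.floordiv (pvCntL cs key + pvCntU cs key) 2)) (0, 0)
  let extra := p.2 - p.1
  p.1 + (if extra ≥ k then k else extra)

-- ===== PRECONDITION & SPEC =====
def Spec_check_max_score (s : String) (k : Int) (out : Int) : Prop := out = check_max_score_alt s k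
instance (s : String) (k : Int) (out : Int) : Decidable (Spec_check_max_score s k out) := by unfold Spec_check_max_score; infer_instance

-- ===== CLAIM (what is proved, stated in full; the proofs are below) =====
def Claim_equal_check_max_score : Prop := ∀ (s : String) (k : Int), Dom_check_max_score s k → Spec_check_max_score s k (check_max_score s k)

-- ===== LEMMAS AND PROOFS =====

-- the dict A builds holds, at each key, exactly B's two counts
lemma pv_getD_build (cs : List Char) (d : PySem.Dict (Char × Char) (Int × Int)) (key : Char × Char) :
    (cs.foldl (fun d c => d.insert (pvKey c) (pvStepA d c)) d).getD key (0, 0)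
      = ((d.getD key (0, 0)).1 + pvCntL cs key, (d.getD key (0, 0)).2 + pvCntU cs key) := by
  induction cs generalizing d with
  | nil => simp [pvCntL, pvCntU]
  | cons c cs ih =>
    rw [List.foldl_cons, ih]
    simp only [PySem.Dict.getD_insert, pvCntL, pvCntU, List.countP_cons]
    by_cases hk : key = pvKey c
    · subst hk
      simp only [pvStepA, beq_self_eq_true, Bool.true_and]
      by_cases hc : c = pvLower c
      · have h1 : (c == pvLower c) = true := beq_iff_eq.mpr hc
        have h2 : (c != pvLower c) = false := by simp [bne, h1]
        rw [if_pos hc, h1, h2]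
        simp only [if_true]
        exact Prod.ext (by push_cast; ring) (by push_cast; ring)
      · have h1 : (c == pvLower c) = false := by simp [hc]
        have h2 : (c != pvLower c) = true := by simp [bne, h1]
        rw [if_neg hc, h1, h2]
        simp only [if_true]
        exact Prod.ext (by push_cast; ring) (by push_cast; ring)
    · have : (pvKey c == key) = false := by simp; exact fun h => hk h.symm
      simp [if_neg hk, this]

lemma pvCntL_nonneg (cs : List Char) (key : Char × Char) : 0 ≤ pvCntL cs key := by
  unfold pvCntL; exact Int.natCast_nonneg _
lemma pvCntU_nonneg (cs : List Char) (key : Char × Char) : 0 ≤ pvCntU cs key := by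
  unfold pvCntU; exact Int.natCast_nonneg _

-- per-key arithmetic: |u - l| // 2 = (l + u) // 2 - min l u for nonnegative l, u
lemma pv_key_arith (l u : Int) (_hl : 0 ≤ l) (_hu : 0 ≤ u) :
    PySem.Int.floordiv |u - l| 2 = PySem.Int.floordiv (l + u) 2 - min l u := by
  rw [PySem.Int.floordiv_eq_ediv_of_pos (by omega), PySem.Int.floordiv_eq_ediv_of_pos (by omega)]
  rcases abs_cases (u - l) with ⟨h, _⟩ | ⟨h, _⟩ <;> rw [h] <;> omega

-- the two extra-score sums agree modulo the base-score sum, over any key list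
lemma pv_sum_arith (cs : List Char) (K : List (Char × Char)) :
    (K.map (fun key => PySem.Int.floordiv |pvCntU cs key - pvCntL cs key| 2)).sum
      = (K.map (fun key => PySem.Int.floordiv (pvCntL cs key + pvCntU cs key) 2)).sum
        - (K.map (fun key => min (pvCntL cs key) (pvCntU cs key))).sum := by
  induction K with
  | nil => simp
  | cons key K ih =>
    simp only [List.map_cons, List.sum_cons, ih,
      pv_key_arith _ _ (pvCntL_nonneg cs key) (pvCntU_nonneg cs key)]
    ring

-- ===== VERDICT (by name: the statement is the Claim_ definition above) =====
theorem check_max_score_spec : Claim_equal_check_max_score := by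
  intro s k _
  show check_max_score s k = check_max_score_alt s k
  unfold check_max_score check_max_score_alt
  set cs := s.toList with hcs
  have hkeys : (cs.foldl (fun d c => d.insert (pvKey c) (pvStepA d c)) PySem.Dict.empty).keys
      = PySem.List.dedup (cs.map pvKey) := by
    rw [PySem.Dict.keys_foldl_insert_key]
    simp [PySem.List.dedup, PySem.Set.update_nil_left, PySem.Dict.keys_empty]
  simp only [hkeys, pv_getD_build, PySem.Dict.getD_empty, zero_add]
  rw [PySem.List.foldl_prod_mk
        (f := fun acc key => acc + min (pvCntL cs key) (pvCntU cs key))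
        (g := fun acc key => acc + PySem.Int.floordiv |pvCntU cs key - pvCntL cs key| 2),
      PySem.List.foldl_prod_mk
        (f := fun acc key => acc + min (pvCntL cs key) (pvCntU cs key))
        (g := fun acc key => acc + PySem.Int.floordiv (pvCntL cs key + pvCntU cs key) 2)]
  simp only [PySem.List.foldl_add, zero_add]
  rw [pv_sum_arith cs]
  split_ifs <;> omega
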